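-- pv_equiv track=rewrite | github.com/DEUS-AI/localbricks | deus_lib/bronze_factory/csv_files_processor.py | create_sub_micro_batch
-- ===== SOURCE A (Python) =====
-- from collections import defaultdict, OrderedDict
--
-- def create_sub_micro_batch(source_header_sep: dict[str, tuple[list, str]], seps: list[str]) -> dict[str, tuple[list, list]]:
--     """
--     Create sub-micro batches based on separators.
--
--     Args:
--         source_header_sep (dict): A dictionary with file paths as keys and tuples of (header, separator) as values.
--         seps (list): List of separators to consider.
--
--     Returns:
--         dict: A dictionary with separators as keys and tuples of (file_paths, headers) as values.
--     """
--     micro_batches = defaultdict(lambda: ([], []))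
--
--     for file_path, (header, current_sep) in source_header_sep.items():
--         if current_sep in seps:
--             file_paths, headers = micro_batches[current_sep]
--             file_paths.append(file_path)
--             headers.append(header)
--
--     return dict(micro_batches)
-- ===== SOURCE B (Python) =====
-- def create_sub_micro_batch(source_header_sep: dict[str, tuple[list, str]], seps: list[str]) -> dict[str, tuple[list, list]]:
--     # Outer loop over the separators that actually occur (in first-occurrence
--     # order), inner comprehensions gather the matching file paths and headers.
--     order = []
--     for _file_path, (_header, current_sep) in source_header_sep.items():
--         if current_sep in seps and current_sep not in order:
--             order.append(current_sep)
--     return {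
--         sep: (
--             [fp for fp, (_h, s) in source_header_sep.items() if s == sep],
--             [h for _fp, (h, s) in source_header_sep.items() if s == sep],
--         )
--         for sep in order
--     }
-- ===== Notes on version B (the rewrite author's own statement) =====
-- stated objective: alternative
-- what changed: A builds the grouping in one pass with a defaultdict mutated in place; B first collects the distinct relevant separators in first-occurrence order and then, per separator, gathers its file paths and headers by scanning the items with comprehensions.
import Mathlib
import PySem

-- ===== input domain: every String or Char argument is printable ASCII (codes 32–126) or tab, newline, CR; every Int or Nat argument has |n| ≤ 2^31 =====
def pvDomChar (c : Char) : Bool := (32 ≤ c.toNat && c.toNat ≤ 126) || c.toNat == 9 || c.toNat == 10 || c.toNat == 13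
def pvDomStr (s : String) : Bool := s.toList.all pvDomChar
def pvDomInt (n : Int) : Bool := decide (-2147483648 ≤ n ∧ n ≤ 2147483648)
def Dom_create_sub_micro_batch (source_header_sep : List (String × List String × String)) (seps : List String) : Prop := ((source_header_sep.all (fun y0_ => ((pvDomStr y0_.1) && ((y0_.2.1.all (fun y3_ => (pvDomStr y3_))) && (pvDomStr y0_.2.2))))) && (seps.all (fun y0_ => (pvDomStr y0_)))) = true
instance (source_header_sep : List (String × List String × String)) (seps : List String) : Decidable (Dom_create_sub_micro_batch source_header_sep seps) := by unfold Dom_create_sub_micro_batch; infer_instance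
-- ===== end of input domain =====

-- B replaces A's single-pass defaultdict build by an outer loop over the distinct
-- occurring separators with per-separator gathering comprehensions (alternative
-- decomposition, same results).


-- ===== PORT A =====
-- one step of A's loop body: defaultdict access creates the ([],[]) bucket at
-- the end on first touch; the in-place list appends update the existing bucket
def aStep (seps : List String) (mb : List (String × List String × List (List String)))
    (p : String × List String × String) : List (String × List String × List (List String)) :=
  if seps.contains p.2.2 then
    if mb.any (fun q => q.1 == p.2.2) then
      mb.map (fun q => if q.1 == p.2.2 then (q.1, q.2.1 ++ [p.1], q.2.2 ++ [p.2.1]) else q)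
    else mb ++ [(p.2.2, [p.1], [p.2.1])]
  else mb

def create_sub_micro_batch (source_header_sep : List (String × List String × String)) (seps : List String) : List (String × List String × List (List String)) :=
  source_header_sep.foldl (aStep seps) []

-- ===== PORT B =====
-- B's first loop: distinct relevant separators in first-occurrence order
def bOrder (seps : List String) (shs : List (String × List String × String)) : List String :=
  shs.foldl (fun order p => if seps.contains p.2.2 && !(order.contains p.2.2) then order ++ [p.2.2] else order) []

-- B's dict-comprehension value for one separator (the two comprehensions)
def bBucket (shs : List (String × List String × String)) (s : String) : String × List String × List (List String) :=
  (s, (shs.filter (fun p => p.2.2 == s)).map (fun p => p.1),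
      (shs.filter (fun p => p.2.2 == s)).map (fun p => p.2.1))

def create_sub_micro_batch_alt (source_header_sep : List (String × List String × String)) (seps : List String) : List (String × List String × List (List String)) :=
  (bOrder seps source_header_sep).map (bBucket source_header_sep)

-- ===== PRECONDITION & SPEC =====
def Spec_create_sub_micro_batch (source_header_sep : List (String × List String × String)) (seps : List String) (out : List (String × List String × List (List String))) : Prop := out = create_sub_micro_batch_alt source_header_sep seps
instance (source_header_sep : List (String × List String × String)) (seps : List String) (out : List (String × List String × List (List String))) : Decidable (Spec_create_sub_micro_batch source_header_sep seps out) := by unfold Spec_create_sub_micro_batch; infer_instance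

-- ===== CLAIM (what is proved, stated in full; the proofs are below) =====
def Claim_equal_create_sub_micro_batch : Prop := ∀ (source_header_sep : List (String × List String × String)) (seps : List String), Dom_create_sub_micro_batch source_header_sep seps → Spec_create_sub_micro_batch source_header_sep seps (create_sub_micro_batch source_header_sep seps)

-- ===== LEMMAS AND PROOFS =====

lemma bOrder_append (seps : List String) (l : List (String × List String × String))
    (x : String × List String × String) :
    bOrder seps (l ++ [x]) =
      if x.2.2 ∈ seps ∧ x.2.2 ∉ bOrder seps l
      then bOrder seps l ++ [x.2.2] else bOrder seps l := by
  simp [bOrder, List.foldl_append]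

lemma bBucket_append (l : List (String × List String × String))
    (x : String × List String × String) (s : String) :
    bBucket (l ++ [x]) s =
      if x.2.2 = s
      then (s, (bBucket l s).2.1 ++ [x.1], (bBucket l s).2.2 ++ [x.2.1])
      else bBucket l s := by
  by_cases h : x.2.2 = s <;> simp [bBucket, List.filter_append, h]

-- the main invariant of A's fold, proved by right-to-left induction:
-- its state is exactly B's buckets in B's order, every collected separator is
-- in seps, and a separator of seps not yet collected occurs nowhere in the prefix
lemma main_inv (seps : List String) (l : List (String × List String × String)) :
    l.foldl (aStep seps) [] = (bOrder seps l).map (bBucket l)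
    ∧ (∀ s ∈ bOrder seps l, s ∈ seps)
    ∧ (∀ s, s ∈ seps → s ∉ bOrder seps l → ∀ p ∈ l, p.2.2 ≠ s) := by
  induction l using List.reverseRecOn with
  | nil => simp [bOrder]
  | append_singleton l x ih =>
    obtain ⟨hfold, hmem, hfresh⟩ := ih
    rw [List.foldl_append, hfold, bOrder_append]
    by_cases hin : x.2.2 ∈ seps
    · by_cases hord : x.2.2 ∈ bOrder seps l
      · -- already collected: the bucket of x.2.2 grows, others unchanged
        rw [if_neg (by tauto)]
        refine ⟨?_, hmem, ?_⟩
        · have hany : ((bOrder seps l).map (bBucket l)).any (fun q => q.1 == x.2.2) = true := by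
            simp only [List.any_eq_true, List.mem_map]
            exact ⟨bBucket l x.2.2, ⟨x.2.2, hord, rfl⟩, by simp [bBucket]⟩
          simp only [aStep, List.foldl_cons, List.foldl_nil, List.contains_iff_mem, hin,
            if_pos, hany, List.map_map]
          refine List.map_congr_left (fun s hs => ?_)
          by_cases hsx : s = x.2.2
          · subst hsx; simp [bBucket]
          · simp [Ne.symm hsx, Function.comp, bBucket, hsx]
        · intro s hs hns p hp
          rcases List.mem_append.mp hp with hpl | hpx
          · exact hfresh s hs hns p hpl
          · simp at hpx; subst hpx
            intro he; exact hns (he ▸ hord)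
      · -- fresh separator: a new bucket is appended, old buckets unchanged
        rw [if_pos ⟨hin, hord⟩]
        have hempty : bBucket l x.2.2 = (x.2.2, [], []) := by
          have : l.filter (fun p => p.2.2 == x.2.2) = [] := by
            refine List.filter_eq_nil_iff.mpr (fun p hp => ?_)
            simp [hfresh x.2.2 hin hord p hp]
          simp [bBucket, this]
        refine ⟨?_, ?_, ?_⟩
        · have hany : ((bOrder seps l).map (bBucket l)).any (fun q => q.1 == x.2.2) = false := by
            simp only [List.any_eq_false]
            rintro q hq
            rcases List.mem_map.mp hq with ⟨s, hs, rfl⟩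
            simp only [bBucket, beq_iff_eq]
            exact fun he => hord (he ▸ hs)
          simp only [aStep, List.foldl_cons, List.foldl_nil, List.contains_iff_mem, hin,
            if_pos, hany, Bool.false_eq_true, if_false, List.map_append]
          congr 1
          · refine List.map_congr_left (fun s hs => ?_)
            have hne : x.2.2 ≠ s := fun he => hord (he ▸ hs)
            simp [bBucket_append, hne]
          · simp [bBucket_append, hempty]
        · intro s hs
          rcases List.mem_append.mp hs with h1 | h2
          · exact hmem s h1
          · simp at h2; exact h2 ▸ hin
        · intro s hs hns p hp
          have hns1 : s ∉ bOrder seps l := fun h => hns (List.mem_append.mpr (Or.inl h))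
          have hns2 : s ≠ x.2.2 := fun h => hns (List.mem_append.mpr (Or.inr (by simp [h])))
          rcases List.mem_append.mp hp with hpl | hpx
          · exact hfresh s hs hns1 p hpl
          · simp at hpx; subst hpx
            exact fun he => hns2 he.symm
    · -- separator not requested: state and order unchanged, x matches no bucket
      rw [if_neg (by tauto)]
      have hcs : (seps.contains x.2.2) = false := by
        simpa [List.contains_iff_mem] using hin
      refine ⟨?_, hmem, ?_⟩
      · simp only [aStep, List.foldl_cons, List.foldl_nil, hcs, Bool.false_eq_true, if_false]
        refine List.map_congr_left (fun s hs => ?_)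
        have hne : x.2.2 ≠ s := fun he => hin (he ▸ hmem s hs)
        simp [bBucket_append, hne]
      · intro s hs hns p hp
        rcases List.mem_append.mp hp with hpl | hpx
        · exact hfresh s hs hns p hpl
        · simp at hpx; subst hpx
          exact fun he => hin (he ▸ hs)

-- ===== VERDICT (by name: the statement is the Claim_ definition above) =====
theorem create_sub_micro_batch_spec : Claim_equal_create_sub_micro_batch := by
  intro shs seps _
  unfold Spec_create_sub_micro_batch create_sub_micro_batch create_sub_micro_batch_alt
  exact (main_inv seps shs).1
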